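-- pv_equiv track=rewrite | github.com/WillCurran/MPC_Robotics | src/DFA_matrix.py | permDfaMat
-- ===== SOURCE A (Python) =====
-- def permDfaMat(M, PER, n, q):
--     PM = [[(-1, -1) for j in range(q)] for i in range(n)]
--     for i in range(n):
--         for j in range(q):
--             j_permuted = PER[i][j] # pick a random index in this row of PM
--             # make the i-th element of PM point to the same states in the next row as M[i][j] does.
--             # These states will be placed at the PER[i + 1][M[i][j]]-th index of PM in the next iteration,
--             # so point there with the promise that we will place them there next iteration.
--             res_0 = PER[i + 1][M[i][j][0] ]
--             res_1 = PER[i + 1][M[i][j][1] ]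
--             output = M[i][j][2]
--             PM[i][j_permuted] = (res_0, res_1, output)
--     return PM
-- ===== SOURCE B (Python) =====
-- def permDfaMat(M, PER, n, q):
--     PM = []
--     for i in range(n):
--         # invert this row's permutation once: inv[c] = source column j (last write wins)
--         inv = [None] * q
--         for j in range(q):
--             inv[PER[i][j]] = j
--         # gather: fill output columns left to right
--         row = []
--         for c in range(q):
--             j = inv[c]
--             if j is None:
--                 row.append((-1, -1))
--             else:
--                 t = M[i][j]
--                 row.append((PER[i + 1][t[0]], PER[i + 1][t[1]], t[2]))
--         PM.append(row)
--     return PM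
-- ===== Notes on version B (the rewrite author's own statement) =====
-- stated objective: alternative
-- what changed: Instead of scattering triples into a pre-built (-1,-1) matrix (PM[i][PER[i][j]] = v), B inverts each row's permutation once into an index array and then gathers each output row left-to-right as a fresh list.
import Mathlib
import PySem

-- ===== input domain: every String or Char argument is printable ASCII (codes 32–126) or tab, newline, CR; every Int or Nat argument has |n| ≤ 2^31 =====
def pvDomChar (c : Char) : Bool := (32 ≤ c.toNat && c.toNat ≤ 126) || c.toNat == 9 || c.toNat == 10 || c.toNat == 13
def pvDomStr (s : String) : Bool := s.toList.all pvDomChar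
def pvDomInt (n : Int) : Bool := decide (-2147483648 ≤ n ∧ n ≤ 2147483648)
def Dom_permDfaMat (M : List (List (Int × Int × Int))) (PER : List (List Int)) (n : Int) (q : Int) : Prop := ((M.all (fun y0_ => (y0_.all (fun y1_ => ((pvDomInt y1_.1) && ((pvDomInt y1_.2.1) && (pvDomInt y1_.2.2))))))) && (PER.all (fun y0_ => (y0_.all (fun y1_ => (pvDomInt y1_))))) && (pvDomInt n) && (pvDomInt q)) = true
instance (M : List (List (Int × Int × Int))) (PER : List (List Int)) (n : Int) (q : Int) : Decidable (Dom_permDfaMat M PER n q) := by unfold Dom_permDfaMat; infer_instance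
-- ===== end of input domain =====

-- B replaces A's scatter into a pre-built matrix by a per-row permutation inversion followed by a
-- gather over output columns (objective: alternative decomposition, same cost).

-- ===== PORT A =====
-- Where the Python raises IndexError a pyGet? returns none and pvValA yields none: that branch leaves
-- PM unchanged, and the initial (-1,-1) 2-tuple placeholder is represented by the triple (-1,-1,0);
-- both situations are excluded by Pre_permDfaMat.
-- One loop-body step of A: j_permuted = PER[i][j]; res_0 = PER[i+1][M[i][j][0]];
-- res_1 = PER[i+1][M[i][j][1]]; output = M[i][j][2].
def pvValA (M : List (List (Int × Int × Int))) (PER : List (List Int)) (i : Int) (j : Int) :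
    Option (Int × (Int × Int × Int)) :=
  match PySem.List.pyGet? PER i with
  | none => none
  | some Pi =>
    match PySem.List.pyGet? Pi j with
    | none => none
    | some jp =>
      match PySem.List.pyGet? M i with
      | none => none
      | some Mi =>
        match PySem.List.pyGet? Mi j with
        | none => none
        | some t =>
          match PySem.List.pyGet? PER (i + 1) with
          | none => none
          | some Pi1 =>
            match PySem.List.pyGet? Pi1 t.1, PySem.List.pyGet? Pi1 t.2.1 with
            | some r0, some r1 => some (jp, (r0, r1, t.2.2))
            | _, _ => none

-- PM[i][j_permuted] = (res_0, res_1, output)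
def pvStepA (M : List (List (Int × Int × Int))) (PER : List (List Int)) (i : Int)
    (PM : List (List (Int × Int × Int))) (j : Int) : List (List (Int × Int × Int)) :=
  match pvValA M PER i j with
  | none => PM
  | some x => PySem.List.pySetD PM i (PySem.List.pySetD (PySem.List.pyGetD PM i []) x.1 x.2)

def permDfaMat (M : List (List (Int × Int × Int))) (PER : List (List Int)) (n : Int) (q : Int) : List (List (Int × Int × Int)) :=
  (PySem.List.pyRange 0 n 1).foldl
    (fun PM i => (PySem.List.pyRange 0 q 1).foldl (pvStepA M PER i) PM)
    ((PySem.List.pyRange 0 n 1).map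
      (fun _ => (PySem.List.pyRange 0 q 1).map (fun _ => ((-1 : Int), (-1 : Int), (0 : Int)))))

-- ===== PORT B =====
-- Gather step of Source B: what row i's output column holds, given the inverted-permutation entry.
-- The (-1,-1) 2-tuple of the Python (uncovered column) is represented by (-1,-1,0), and a raising
-- lookup collapses to that placeholder as well; both are unreachable under Pre_permDfaMat.
def pvGather (M : List (List (Int × Int × Int))) (PER : List (List Int)) (i : Int)
    (o : Option Int) : Int × Int × Int :=
  match o with
  | none => ((-1 : Int), (-1 : Int), (0 : Int))
  | some j =>
    match PySem.List.pyGet? (PySem.List.pyGetD M i []) j with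
    | none => ((-1 : Int), (-1 : Int), (0 : Int))
    | some t =>
      match PySem.List.pyGet? (PySem.List.pyGetD PER (i + 1) []) t.1,
            PySem.List.pyGet? (PySem.List.pyGetD PER (i + 1) []) t.2.1 with
      | some r0, some r1 => (r0, r1, t.2.2)
      | _, _ => ((-1 : Int), (-1 : Int), (0 : Int))

-- Source B: inv = [None]*q; for j in range(q): inv[PER[i][j]] = j   (last write wins, negative wrap via pySetD)
def pvInvRow (PER : List (List Int)) (i : Int) (q : Int) : List (Option Int) :=
  (PySem.List.pyRange 0 q 1).foldl
    (fun a j =>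
      match PySem.List.pyGet? (PySem.List.pyGetD PER i []) j with
      | none => a
      | some p => PySem.List.pySetD a p (some j))
    (List.replicate q.toNat none)

def permDfaMat_alt (M : List (List (Int × Int × Int))) (PER : List (List Int)) (n : Int) (q : Int) : List (List (Int × Int × Int)) :=
  (PySem.List.pyRange 0 n 1).map (fun i => (pvInvRow PER i q).map (pvGather M PER i))

-- ===== PRECONDITION & SPEC =====
-- Python's index resolution for a list of length q (used only to state coverage below).
def pvWrapIdx (q : Int) (p : Int) : Int := if p < 0 then p + q else p

-- When n ≤ 0 or q ≤ 0 the loops never touch M or PER and A returns trivially, so Pre_ only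
-- constrains the case 0 < n and 0 < q; there it excludes (a) inputs where A raises IndexError
-- (missing rows/columns of M or PER, PER entries or M state numbers out of range), and (b) inputs
-- where some PER row does not cover every output column, on which A's returned matrix still contains
-- the 2-tuple placeholder (-1,-1) — not a value of the declared return type list[tuple[int,int,int]].
def Pre_permDfaMat (M : List (List (Int × Int × Int))) (PER : List (List Int)) (n : Int) (q : Int) : Prop :=
  0 < n → 0 < q →
  n.toNat ≤ M.length ∧ n.toNat + 1 ≤ PER.length ∧
  ∀ i < n.toNat,
    q.toNat ≤ (PER.getD i []).length ∧
    q.toNat ≤ (M.getD i []).length ∧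
    (∀ j < q.toNat, -q ≤ (PER.getD i []).getD j 0 ∧ (PER.getD i []).getD j 0 < q) ∧
    (∀ c < q.toNat, ∃ j < q.toNat, pvWrapIdx q ((PER.getD i []).getD j 0) = (c : Int)) ∧
    (∀ j < q.toNat,
      PySem.Raise.InRange (PER.getD (i + 1) []).length ((M.getD i []).getD j (0, 0, 0)).1 ∧
      PySem.Raise.InRange (PER.getD (i + 1) []).length ((M.getD i []).getD j (0, 0, 0)).2.1)

instance (M : List (List (Int × Int × Int))) (PER : List (List Int)) (n : Int) (q : Int) : Decidable (Pre_permDfaMat M PER n q) := by unfold Pre_permDfaMat; unfold PySem.Raise.InRange; infer_instance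

def pvWitness_permDfaMat : (List (List (Int × Int × Int))) × List (List Int) × Int × Int :=
  ([[(0, 1, 2), (1, 0, 3)]], [[1, 0], [0, 1]], 1, 2)

def Spec_permDfaMat (M : List (List (Int × Int × Int))) (PER : List (List Int)) (n : Int) (q : Int) (out : List (List (Int × Int × Int))) : Prop := out = permDfaMat_alt M PER n q
instance (M : List (List (Int × Int × Int))) (PER : List (List Int)) (n : Int) (q : Int) (out : List (List (Int × Int × Int))) : Decidable (Spec_permDfaMat M PER n q out) := by unfold Spec_permDfaMat; infer_instance

-- ===== CLAIM (what is proved, stated in full; the proofs are below) =====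
def Claim_equal_permDfaMat : Prop := ∀ (M : List (List (Int × Int × Int))) (PER : List (List Int)) (n : Int) (q : Int), Dom_permDfaMat M PER n q → Pre_permDfaMat M PER n q → Spec_permDfaMat M PER n q (permDfaMat M PER n q)

-- ===== LEMMAS AND PROOFS =====

-- A's inner step, restricted to row i's list (PM appears in pvStepA only through its row i).
def pvRowStepA (M : List (List (Int × Int × Int))) (PER : List (List Int)) (i : Int)
    (r : List (Int × Int × Int)) (j : Int) : List (Int × Int × Int) :=
  match pvValA M PER i j with
  | none => r
  | some x => PySem.List.pySetD r x.1 x.2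

theorem pySetD_pyGetD_self {α : Type} (xs : List α) {i : Int} (d : α)
    (h0 : 0 ≤ i) (h1 : i < (xs.length : Int)) :
    PySem.List.pySetD xs i (PySem.List.pyGetD xs i d) = xs := by
  rw [PySem.List.pySetD_of_nonneg xs _ h0, PySem.List.pyGetD_eq_getElem xs d h0 h1,
    List.set_getElem_self]

theorem pyGetD_pySetD_self {α : Type} (xs : List α) {i : Int} (v : α) (d : α)
    (h0 : 0 ≤ i) (h1 : i < (xs.length : Int)) :
    PySem.List.pyGetD (PySem.List.pySetD xs i v) i d = v := by
  rw [PySem.List.pySetD_of_nonneg xs _ h0]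
  rw [PySem.List.pyGetD_eq_getElem _ d h0 (by simp only [List.length_set]; exact h1)]
  simp

theorem pySetD_pySetD {α : Type} (xs : List α) {i : Int} (v w : α) (h0 : 0 ≤ i) :
    PySem.List.pySetD (PySem.List.pySetD xs i v) i w = PySem.List.pySetD xs i w := by
  simp [PySem.List.pySetD_of_nonneg _ _ h0, List.set_set]

theorem pvStepA_eq (M : List (List (Int × Int × Int))) (PER : List (List Int)) (i : Int)
    (PM : List (List (Int × Int × Int))) (j : Int)
    (h0 : 0 ≤ i) (h1 : i < (PM.length : Int)) :
    pvStepA M PER i PM j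
      = PySem.List.pySetD PM i (pvRowStepA M PER i (PySem.List.pyGetD PM i []) j) := by
  unfold pvStepA pvRowStepA
  cases pvValA M PER i j with
  | none => exact (pySetD_pyGetD_self PM [] h0 h1).symm
  | some x => rfl

theorem pvInner_eq (M : List (List (Int × Int × Int))) (PER : List (List Int)) (i : Int)
    (js : List Int) :
    ∀ (PM : List (List (Int × Int × Int))), 0 ≤ i → i < (PM.length : Int) →
    js.foldl (pvStepA M PER i) PM
      = PySem.List.pySetD PM i
          (js.foldl (pvRowStepA M PER i) (PySem.List.pyGetD PM i [])) := by
  induction js with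
  | nil =>
    intro PM h0 h1
    simpa using (pySetD_pyGetD_self PM [] h0 h1).symm
  | cons j js ih =>
    intro PM h0 h1
    simp only [List.foldl_cons]
    rw [pvStepA_eq M PER i PM j h0 h1]
    rw [ih _ h0 (by rw [PySem.List.length_pySetD]; exact h1)]
    rw [pyGetD_pySetD_self PM _ _ h0 h1, pySetD_pySetD PM _ _ h0]

theorem map_pySetD {α β : Type} (g : α → β) (a : List α) (i : Int) (v : α) :
    PySem.List.pySetD (a.map g) i (g v) = (PySem.List.pySetD a i v).map g := by
  simp only [PySem.List.pySetD, PySem.List.pySet?, List.length_map]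
  cases PySem.List.pyIdx? a.length i <;> simp [List.map_set]

theorem pvScatter_eq {T : Type} (P : Int → Int) (V : Option Int → T) :
    ∀ (js : List Int) (a : List (Option Int)),
    js.foldl (fun r j => PySem.List.pySetD r (P j) (V (some j))) (a.map V)
      = (js.foldl (fun a j => PySem.List.pySetD a (P j) (some j)) a).map V := by
  intro js
  induction js with
  | nil => intro a; rfl
  | cons j js ih =>
    intro a
    simp only [List.foldl_cons]
    rw [map_pySetD V a (P j) (some j)]
    exact ih _

theorem pvOuter_eq (M : List (List (Int × Int × Int))) (PER : List (List Int)) (q : Int)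
    (dRow : List (Int × Int × Int)) (N : Nat) :
    ∀ m : Nat, m ≤ N →
    (PySem.List.pyRange 0 (m : Int) 1).foldl
        (fun PM i => (PySem.List.pyRange 0 q 1).foldl (pvStepA M PER i) PM)
        (List.replicate N dRow)
      = ((PySem.List.pyRange 0 (m : Int) 1).map
          (fun i => (PySem.List.pyRange 0 q 1).foldl (pvRowStepA M PER i) dRow))
        ++ List.replicate (N - m) dRow := by
  intro m
  induction m with
  | zero => intro _; simp [PySem.List.pyRange_one_eq_nil]
  | succ m ih =>
    intro h
    have hm : m ≤ N := Nat.le_of_succ_le h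
    have hcast : ((m + 1 : Nat) : Int) = (m : Int) + 1 := by push_cast; ring
    rw [hcast, PySem.List.pyRange_one_succ_right (by positivity), List.foldl_append,
      List.map_append, ih hm]
    have hrep : N - m = (N - (m + 1)) + 1 := by omega
    rw [hrep, List.replicate_succ]
    set l1 := (PySem.List.pyRange 0 (m : Int) 1).map
      (fun i => (PySem.List.pyRange 0 q 1).foldl (pvRowStepA M PER i) dRow) with hl1
    have hlen1 : l1.length = m := by
      simp [hl1, PySem.List.length_pyRange_one]
    have hlen : ((m : Int)) < ((l1 ++ dRow :: List.replicate (N - (m + 1)) dRow).length : Int) := by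
      simp only [List.length_append, List.length_cons, List.length_replicate, hlen1]
      push_cast
      omega
    simp only [List.foldl_cons, List.foldl_nil]
    rw [pvInner_eq M PER (m : Int) _ _ (by positivity) hlen]
    have hget : PySem.List.pyGetD (l1 ++ dRow :: List.replicate (N - (m + 1)) dRow) (m : Int) [] = dRow := by
      rw [PySem.List.pyGetD_natCast]
      rw [← hlen1]
      rw [List.getD_eq_getElem?_getD, List.getElem?_append_right (by omega)]
      simp
    rw [hget]
    rw [PySem.List.pySetD_natCast, ← hlen1, List.set_append_right _ _ (Nat.le_refl _)]
    simp

theorem pvRow_eq (M : List (List (Int × Int × Int))) (PER : List (List Int)) (n q : Int)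
    (hq : 0 ≤ q) (hM : n.toNat ≤ M.length) (hPERlen : n.toNat + 1 ≤ PER.length)
    (hrows : ∀ i < n.toNat,
      q.toNat ≤ (PER.getD i []).length ∧
      q.toNat ≤ (M.getD i []).length ∧
      (∀ j < q.toNat, -q ≤ (PER.getD i []).getD j 0 ∧ (PER.getD i []).getD j 0 < q) ∧
      (∀ c < q.toNat, ∃ j < q.toNat, pvWrapIdx q ((PER.getD i []).getD j 0) = (c : Int)) ∧
      (∀ j < q.toNat,
        PySem.Raise.InRange (PER.getD (i + 1) []).length ((M.getD i []).getD j (0, 0, 0)).1 ∧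
        PySem.Raise.InRange (PER.getD (i + 1) []).length ((M.getD i []).getD j (0, 0, 0)).2.1))
    (i : Int) (hi0 : 0 ≤ i) (hin : i < n) :
    (PySem.List.pyRange 0 q 1).foldl (pvRowStepA M PER i)
        (List.replicate q.toNat ((-1 : Int), (-1 : Int), (0 : Int)))
      = (pvInvRow PER i q).map (pvGather M PER i) := by
  have hk : i.toNat < n.toNat := by omega
  obtain ⟨hPlen, hMlen, _hbnd, _hcov, hstates⟩ := hrows i.toNat hk
  have hiP : i.toNat < PER.length := by omega
  have hi1P : i.toNat + 1 < PER.length := by omega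
  have hiM : i.toNat < M.length := by omega
  have hgetPER : PySem.List.pyGet? PER i = some (PER.getD i.toNat []) := by
    rw [PySem.List.pyGet?_of_nonneg _ hi0, List.getElem?_eq_getElem hiP,
      List.getD_eq_getElem _ _ hiP]
  have hgetPER1 : PySem.List.pyGet? PER (i + 1) = some (PER.getD (i.toNat + 1) []) := by
    have h1 : (i + 1).toNat = i.toNat + 1 := by omega
    rw [PySem.List.pyGet?_of_nonneg _ (by omega), h1, List.getElem?_eq_getElem hi1P,
      List.getD_eq_getElem _ _ hi1P]
  have hgetM : PySem.List.pyGet? M i = some (M.getD i.toNat []) := by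
    rw [PySem.List.pyGet?_of_nonneg _ hi0, List.getElem?_eq_getElem hiM,
      List.getD_eq_getElem _ _ hiM]
  have hPBD : PySem.List.pyGetD PER i [] = PER.getD i.toNat [] := by
    simp [PySem.List.pyGetD, hgetPER]
  have hP1BD : PySem.List.pyGetD PER (i + 1) [] = PER.getD (i.toNat + 1) [] := by
    simp [PySem.List.pyGetD, hgetPER1]
  have hMBD : PySem.List.pyGetD M i [] = M.getD i.toNat [] := by
    simp [PySem.List.pyGetD, hgetM]
  have hPij : ∀ j ∈ PySem.List.pyRange 0 q 1,
      PySem.List.pyGet? (PER.getD i.toNat []) j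
        = some ((PER.getD i.toNat []).getD j.toNat 0) := by
    intro j hj
    obtain ⟨hj0, hjq⟩ := (PySem.List.mem_pyRange_one).1 hj
    have hjl : j.toNat < (PER.getD i.toNat []).length := by omega
    rw [PySem.List.pyGet?_of_nonneg _ hj0, List.getElem?_eq_getElem hjl,
      List.getD_eq_getElem _ _ hjl]
  have hMij : ∀ j ∈ PySem.List.pyRange 0 q 1,
      PySem.List.pyGet? (M.getD i.toNat []) j
        = some ((M.getD i.toNat []).getD j.toNat (0, 0, 0)) := by
    intro j hj
    obtain ⟨hj0, hjq⟩ := (PySem.List.mem_pyRange_one).1 hj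
    have hjl : j.toNat < (M.getD i.toNat []).length := by omega
    rw [PySem.List.pyGet?_of_nonneg _ hj0, List.getElem?_eq_getElem hjl,
      List.getD_eq_getElem _ _ hjl]
  -- the state lookups of column j all succeed, and A's step value IS B's gather value
  have hval : ∀ j ∈ PySem.List.pyRange 0 q 1,
      pvValA M PER i j
        = some ((PER.getD i.toNat []).getD j.toNat 0, pvGather M PER i (some j)) := by
    intro j hj
    obtain ⟨hj0, hjq⟩ := (PySem.List.mem_pyRange_one).1 hj
    have hjk : j.toNat < q.toNat := by omega
    obtain ⟨hs1, hs2⟩ := hstates j.toNat hjk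
    rcases h1 : PySem.List.pyGet? (PER.getD (i.toNat + 1) [])
        ((M.getD i.toNat []).getD j.toNat (0, 0, 0)).1 with _ | r0
    · exact absurd hs1 ((PySem.List.pyGet?_eq_none_iff _ _).1 h1)
    rcases h2 : PySem.List.pyGet? (PER.getD (i.toNat + 1) [])
        ((M.getD i.toNat []).getD j.toNat (0, 0, 0)).2.1 with _ | r1
    · exact absurd hs2 ((PySem.List.pyGet?_eq_none_iff _ _).1 h2)
    unfold pvValA pvGather
    simp only [hgetPER, hPij j hj, hgetM, hMij j hj, hgetPER1, hMBD, hP1BD, h1, h2]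
  rw [PySem.List.foldl_congr_mem'
    (PySem.List.pyRange 0 q 1) (pvRowStepA M PER i)
    (fun r j => PySem.List.pySetD r ((PER.getD i.toNat []).getD j.toNat 0)
      (pvGather M PER i (some j)))
    (List.replicate q.toNat ((-1 : Int), (-1 : Int), (0 : Int)))
    (by intro j hj r; unfold pvRowStepA; rw [hval j hj])]
  unfold pvInvRow
  rw [PySem.List.foldl_congr_mem'
    (PySem.List.pyRange 0 q 1) _
    (fun a j => PySem.List.pySetD a ((PER.getD i.toNat []).getD j.toNat 0) (some j))
    (List.replicate q.toNat (none : Option Int))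
    (by intro j hj a; simp only [hPBD, hPij j hj])]
  have hinit : List.replicate q.toNat ((-1 : Int), (-1 : Int), (0 : Int))
      = (List.replicate q.toNat (none : Option Int)).map (pvGather M PER i) := by
    rw [List.map_replicate]; rfl
  rw [hinit]
  exact pvScatter_eq (fun j => (PER.getD i.toNat []).getD j.toNat 0)
    (pvGather M PER i) (PySem.List.pyRange 0 q 1) _

-- ===== VERDICT (by name: the statement is the Claim_ definition above) =====
theorem permDfaMat_spec : Claim_equal_permDfaMat := by
  intro M PER n q _hdom hpre
  unfold Spec_permDfaMat
  rcases le_or_gt n 0 with hn0 | hn0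
  · unfold permDfaMat permDfaMat_alt
    rw [PySem.List.pyRange_one_eq_nil hn0]
    rfl
  rcases le_or_gt q 0 with hq0 | hq0
  · unfold permDfaMat permDfaMat_alt pvInvRow
    rw [PySem.List.pyRange_one_eq_nil hq0]
    have htq : q.toNat = 0 := by omega
    simp [htq]
  obtain ⟨hM, hPERlen, hrows⟩ := hpre hn0 hq0
  have hn : (0 : Int) ≤ n := le_of_lt hn0
  unfold permDfaMat permDfaMat_alt
  have hrow0 : (PySem.List.pyRange 0 q 1).map
      (fun _ => ((-1 : Int), (-1 : Int), (0 : Int)))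
      = List.replicate q.toNat ((-1 : Int), (-1 : Int), (0 : Int)) := by
    rw [List.map_const', PySem.List.length_pyRange_one]
    norm_num
  have hPM0 : (PySem.List.pyRange 0 n 1).map
      (fun _ => (PySem.List.pyRange 0 q 1).map (fun _ => ((-1 : Int), (-1 : Int), (0 : Int))))
      = List.replicate n.toNat (List.replicate q.toNat ((-1 : Int), (-1 : Int), (0 : Int))) := by
    rw [hrow0, List.map_const', PySem.List.length_pyRange_one]
    norm_num
  rw [hPM0]
  have hncast : ((n.toNat : Int)) = n := Int.toNat_of_nonneg hn
  have houter := pvOuter_eq M PER q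
    (List.replicate q.toNat ((-1 : Int), (-1 : Int), (0 : Int))) n.toNat n.toNat (Nat.le_refl _)
  rw [hncast] at houter
  rw [houter]
  simp only [Nat.sub_self, List.replicate_zero, List.append_nil]
  refine List.map_congr_left ?_
  intro i hi
  obtain ⟨hi0, hin⟩ := (PySem.List.mem_pyRange_one).1 hi
  exact pvRow_eq M PER n q (le_of_lt hq0) hM hPERlen hrows i hi0 hin
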